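-- pv_equiv track=rewrite | github.com/AraujoJs/PythonDefis | Main/RpgLordOfRings/menu.py | get_left_points
-- ===== SOURCE A (Python) =====
-- def get_left_points(balance):
--     custs = [(11, 1), (13, 2), (15, 3), (17, 4)]
--     points = 10
--     for value, cust in custs:
--         if balance >= cust * 2:
--             points = value + 1
--             balance -= cust * 2
--         elif balance >= cust:
--             points = value
--             break
--         else:
--             break
--     return points
-- ===== SOURCE B (Python) =====
-- def get_left_points(balance):
--     # cumulative thresholds of A's tier costs; points = 10 + number of thresholds reached
--     return 10 + sum(1 for t in (1, 2, 4, 6, 9, 12, 16, 20) if balance >= t)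
-- ===== Notes on version B (the rewrite author's own statement) =====
-- stated objective: simpler
-- what changed: Replaced the stateful subtract-and-break loop over tier costs by a stateless count of reached cumulative thresholds (points = 10 + #thresholds <= balance).
import Mathlib
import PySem

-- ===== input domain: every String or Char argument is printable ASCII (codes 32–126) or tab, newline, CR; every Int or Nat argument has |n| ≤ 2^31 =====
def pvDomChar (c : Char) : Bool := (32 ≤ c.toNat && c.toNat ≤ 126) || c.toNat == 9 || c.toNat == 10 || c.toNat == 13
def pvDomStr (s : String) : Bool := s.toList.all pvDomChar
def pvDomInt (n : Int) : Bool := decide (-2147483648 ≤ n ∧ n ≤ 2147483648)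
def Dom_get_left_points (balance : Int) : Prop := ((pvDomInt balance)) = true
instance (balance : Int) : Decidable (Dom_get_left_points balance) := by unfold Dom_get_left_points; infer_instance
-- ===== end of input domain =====

-- B replaces A's stateful subtract-and-break loop by a stateless count of reached cumulative thresholds (simpler).


-- ===== PORT A =====
-- the for-loop with break, as structural recursion over (points, balance)
def glpLoop (custs : List (Int × Int)) (points : Int) (balance : Int) : Int :=
  match custs with
  | [] => points
  | (value, cust) :: rest =>
    if balance ≥ cust * 2 then glpLoop rest (value + 1) (balance - cust * 2)
    else if balance ≥ cust then value
    else points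

def get_left_points (balance : Int) : Int :=
  glpLoop [(11, 1), (13, 2), (15, 3), (17, 4)] 10 balance

-- ===== PORT B =====
def get_left_points_alt (balance : Int) : Int :=
  10 + ((([1, 2, 4, 6, 9, 12, 16, 20] : List Int).countP (fun t => decide (balance ≥ t)) : Nat) : Int)

-- ===== PRECONDITION & SPEC =====
def Spec_get_left_points (balance : Int) (out : Int) : Prop := out = get_left_points_alt balance
instance (balance : Int) (out : Int) : Decidable (Spec_get_left_points balance out) := by unfold Spec_get_left_points; infer_instance

-- ===== CLAIM (what is proved, stated in full; the proofs are below) =====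
def Claim_equal_get_left_points : Prop := ∀ (balance : Int), Dom_get_left_points balance → Spec_get_left_points balance (get_left_points balance)

-- ===== LEMMAS AND PROOFS =====

-- ===== VERDICT (by name: the statement is the Claim_ definition above) =====
set_option maxHeartbeats 4000000 in
theorem get_left_points_spec : Claim_equal_get_left_points := by
  intro b _
  unfold Spec_get_left_points get_left_points get_left_points_alt
  simp only [glpLoop, List.countP_cons, List.countP_nil]
  split_ifs <;> simp only [decide_eq_true_eq] at * <;> omega
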